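-- pv_equiv track=rewrite | github.com/hparik11/interview_questions | count_subset_min_max_less_than_k.py | get_subset_count
-- ===== SOURCE A (Python) =====
-- def get_subset_count(arr, K, N):
--     # Sorting the array
--     arr.sort()
--
--     left = 0;
--     right = N - 1;
--
--     # ans stores total number of subsets
--     ans = 0;
--
--     while left <= right:
--         if arr[left] + arr[right] < K:
--
--             # Add all possible subsets
--             # between i and j
--             ans += 1 << (right - left);
--             left += 1;
--         else:
--
--             # Decrease the sum
--             right -= 1;
--
--     return ans;
-- ===== SOURCE B (Python) =====
-- def get_subset_count(arr, K, N):
--     # Sorting the array (in place, like the original)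
--     arr.sort()
--
--     ans = 0
--     left = 0
--     while left < N:
--         if arr[left] + arr[left] < K:
--             # binary search for the largest R in [left, N-1]
--             # with arr[left] + arr[R] < K
--             lo, hi = left, N - 1
--             while lo < hi:
--                 mid = (lo + hi + 1) // 2
--                 if arr[left] + arr[mid] < K:
--                     lo = mid
--                 else:
--                     hi = mid - 1
--             ans += 1 << (lo - left)
--             left += 1
--         else:
--             # arr is sorted: no larger left can qualify either
--             break
--     return ans
-- ===== Notes on version B (the rewrite author's own statement) =====
-- stated objective: alternative
-- what changed: Replaces the monotone two-pointer sweep with, for each left index, a direct binary search over [left, N-1] for the largest partner R with arr[left]+arr[R] < K (breaking as soon as arr[left]+arr[left] >= K).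
import Mathlib
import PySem

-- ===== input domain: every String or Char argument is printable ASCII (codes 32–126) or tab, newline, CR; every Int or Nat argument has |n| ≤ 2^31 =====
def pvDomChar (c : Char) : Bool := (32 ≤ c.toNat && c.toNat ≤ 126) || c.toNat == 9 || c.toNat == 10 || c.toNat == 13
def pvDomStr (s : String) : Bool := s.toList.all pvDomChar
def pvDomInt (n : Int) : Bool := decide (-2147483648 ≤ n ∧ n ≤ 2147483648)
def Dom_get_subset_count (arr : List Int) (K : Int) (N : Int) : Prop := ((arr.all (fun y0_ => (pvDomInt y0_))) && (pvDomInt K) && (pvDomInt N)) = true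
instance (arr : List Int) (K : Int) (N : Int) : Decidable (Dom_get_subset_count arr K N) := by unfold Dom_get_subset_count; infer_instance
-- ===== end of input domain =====

-- B replaces A's two-pointer sweep by a per-left binary search (alternative algorithm, same cost class).
-- Both Pythons sort `arr` in place; the equivalence proved here is about the RETURN value only.

-- ===== PORT A =====
-- A's while loop: left/right two-pointer; arr[...] is in range under Pre_, so pyGetD's default is never taken.
def pvALoop (s : List Int) (K : Int) (left right ans : Int) : Int :=
  if _h : left ≤ right then
    if PySem.List.pyGetD s left 0 + PySem.List.pyGetD s right 0 < K then
      pvALoop s K (left + 1) right (ans + (1 : Int) <<< (right - left).toNat)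
    else
      pvALoop s K left (right - 1) ans
  else ans
termination_by (right - left + 1).toNat
decreasing_by all_goals omega

def get_subset_count (arr : List Int) (K : Int) (N : Int) : Int :=
  pvALoop (PySem.List.sorted arr (fun x => x) false) K 0 (N - 1) 0

-- ===== PORT B =====
-- B's inner while: binary search for the largest R in [lo, hi] with arr[left] + arr[R] < K.
def pvBSearch (s : List Int) (K : Int) (left lo hi : Int) : Int :=
  if _h : lo < hi then
    let mid := PySem.Int.floordiv (lo + hi + 1) 2
    if PySem.List.pyGetD s left 0 + PySem.List.pyGetD s mid 0 < K then
      pvBSearch s K left mid hi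
    else
      pvBSearch s K left lo (mid - 1)
  else lo
termination_by (hi - lo).toNat
decreasing_by
  all_goals
    have h := PySem.Int.floordiv_two_mid_bounds (lo := lo + 1) (hi := hi) (by omega)
    have he : lo + 1 + hi = lo + hi + 1 := by ring
    rw [he] at h
    simp only [mid] at *
    omega

-- B's outer while over left, with its early break.
def pvBLoop (s : List Int) (K : Int) (N left ans : Int) : Int :=
  if _h : left < N then
    if PySem.List.pyGetD s left 0 + PySem.List.pyGetD s left 0 < K then
      let r := pvBSearch s K left left (N - 1)
      pvBLoop s K N (left + 1) (ans + (1 : Int) <<< (r - left).toNat)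
    else ans
  else ans
termination_by (N - left).toNat
decreasing_by all_goals omega

def get_subset_count_alt (arr : List Int) (K : Int) (N : Int) : Int :=
  pvBLoop (PySem.List.sorted arr (fun x => x) false) K N 0 0

-- ===== PRECONDITION & SPEC =====
-- A raises IndexError exactly when N ≥ 1 and N exceeds len(arr); Pre_ excludes those inputs.
def Pre_get_subset_count (arr : List Int) (K : Int) (N : Int) : Prop :=
  N ≤ (arr.length : Int) ∨ N ≤ 0
instance (arr : List Int) (K : Int) (N : Int) : Decidable (Pre_get_subset_count arr K N) := by
  unfold Pre_get_subset_count; infer_instance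

def pvWitness_get_subset_count : List Int × Int × Int := ([3, 1, 2], 5, 3)

def Spec_get_subset_count (arr : List Int) (K : Int) (N : Int) (out : Int) : Prop := out = get_subset_count_alt arr K N
instance (arr : List Int) (K : Int) (N : Int) (out : Int) : Decidable (Spec_get_subset_count arr K N out) := by unfold Spec_get_subset_count; infer_instance

-- ===== CLAIM (what is proved, stated in full; the proofs are below) =====
def Claim_equal_get_subset_count : Prop := ∀ (arr : List Int) (K : Int) (N : Int), Dom_get_subset_count arr K N → Pre_get_subset_count arr K N → Spec_get_subset_count arr K N (get_subset_count arr K N)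

-- ===== LEMMAS AND PROOFS =====

-- Abbreviation used throughout the proofs: indexing into the sorted list.
-- Monotonicity of pyGetD on in-range indices of a ≤-sorted list.
theorem pv_g_mono {s : List Int} (hs : s.Pairwise (· ≤ ·)) {i j n : Int}
    (hn : n ≤ (s.length : Int)) (h0 : 0 ≤ i) (hij : i ≤ j) (hj : j < n) :
    PySem.List.pyGetD s i 0 ≤ PySem.List.pyGetD s j 0 := by
  have hi' : i < (s.length : Int) := by omega
  have hj' : j < (s.length : Int) := by omega
  rw [PySem.List.pyGetD_eq_getElem s 0 h0 hi', PySem.List.pyGetD_eq_getElem s 0 (by omega) hj']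
  rcases eq_or_lt_of_le hij with h | h
  · simp [h]
  · exact (List.pairwise_iff_getElem.mp hs) i.toNat j.toNat (by omega) (by omega) (by omega)

-- binary search characterisation: if r is the largest index in [lo, hi] whose sum is < K,
-- and lo itself qualifies, then pvBSearch finds r.
theorem pvBSearch_eq {s : List Int} (hs : s.Pairwise (· ≤ ·)) (K left : Int) {n : Int}
    (hn : n ≤ (s.length : Int)) (lo hi : Int) :
    ∀ r : Int, 0 ≤ lo → lo ≤ r → r ≤ hi → hi < n →
    PySem.List.pyGetD s left 0 + PySem.List.pyGetD s r 0 < K →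
    (∀ j : Int, r < j → j ≤ hi → ¬ (PySem.List.pyGetD s left 0 + PySem.List.pyGetD s j 0 < K)) →
    pvBSearch s K left lo hi = r := by
  fun_induction pvBSearch s K left lo hi with
  | case1 lo hi hlt mid hbr ih =>
      intro r h0lo hlor hrhi hhin hrK hout
      have hmid := PySem.Int.floordiv_two_mid_bounds (lo := lo + 1) (hi := hi) (by omega)
      have he : lo + 1 + hi = lo + hi + 1 := by ring
      rw [he] at hmid
      have hmid' : lo + 1 ≤ mid ∧ mid ≤ hi := hmid
      -- r cannot be below mid: mid would be a larger qualifying index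
      have hmr : mid ≤ r := by
        by_contra hc
        exact hout mid (by omega) (by omega) hbr
      exact ih r (by omega) hmr hrhi hhin hrK (fun j h1 h2 => hout j h1 (by omega))
  | case2 lo hi hlt mid hbr ih =>
      intro r h0lo hlor hrhi hhin hrK hout
      have hmid := PySem.Int.floordiv_two_mid_bounds (lo := lo + 1) (hi := hi) (by omega)
      have he : lo + 1 + hi = lo + hi + 1 := by ring
      rw [he] at hmid
      have hmid' : lo + 1 ≤ mid ∧ mid ≤ hi := hmid
      -- r cannot reach mid: monotonicity would make mid qualify
      have hrm : r ≤ mid - 1 := by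
        by_contra hc
        have := pv_g_mono hs hn (show (0:Int) ≤ mid by omega) (show mid ≤ r by omega) (by omega)
        exact hbr (by omega)
      exact ih r h0lo hlor hrm (by omega) hrK (fun j h1 h2 => hout j h1 (by omega))
  | case3 lo hi hge =>
      intro r _ hlor hrhi _ _ _
      omega

-- main invariant: A's two-pointer loop from (left, right) equals B's loop from left,
-- provided every index beyond right has already been ruled out for the current left.
theorem pvLoop_eq {s : List Int} (hs : s.Pairwise (· ≤ ·)) (K : Int) {n : Int}
    (hn : n ≤ (s.length : Int)) (left right ans : Int) :
    0 ≤ left → right ≤ n - 1 →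
    (∀ j : Int, right < j → j ≤ n - 1 → ¬ (PySem.List.pyGetD s left 0 + PySem.List.pyGetD s j 0 < K)) →
    pvALoop s K left right ans = pvBLoop s K n left ans := by
  fun_induction pvALoop s K left right ans with
  | case1 left right ans hlr hbr ih =>
      intro h0 hrn hout
      -- B takes a step too: arr[left]+arr[left] < K, and its search returns exactly `right`
      have hll : PySem.List.pyGetD s left 0 + PySem.List.pyGetD s left 0 < K := by
        have := pv_g_mono hs hn h0 hlr (by omega)
        omega
      have hsearch : pvBSearch s K left left (n - 1) = right :=
        pvBSearch_eq hs K left hn left (n - 1) right h0 hlr hrn (by omega) hbr hout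
      rw [pvBLoop, dif_pos (show left < n by omega), if_pos hll, hsearch]
      refine ih (by omega) hrn ?_
      intro j h1 h2
      by_cases hln : left + 1 ≤ n - 1
      · intro hlt
        have := pv_g_mono hs hn h0 (show left ≤ left + 1 by omega) (by omega)
        exact hout j h1 h2 (by omega)
      · omega
  | case2 left right ans hlr hbr ih =>
      intro h0 hrn hout
      refine ih h0 (by omega) ?_
      intro j h1 h2
      rcases eq_or_lt_of_le (show right ≤ j by omega) with h | h
      · rw [← h]; exact hbr
      · exact hout j h h2
  | case3 left right ans hgt =>
      intro h0 hrn hout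
      rw [pvBLoop]
      by_cases hln : left < n
      · rw [dif_pos hln, if_neg (hout left (by omega) (by omega))]
      · rw [dif_neg hln]

-- ===== VERDICT (by name: the statement is the Claim_ definition above) =====
theorem get_subset_count_spec : Claim_equal_get_subset_count := by
  intro arr K N _hDom hPre
  unfold Spec_get_subset_count get_subset_count get_subset_count_alt
  have hs := PySem.List.sorted_pairwise (xs := arr) (key := fun x => x)
  have hlen : (PySem.List.sorted arr (fun x => x) false).length = arr.length :=
    PySem.List.length_sorted ..
  rcases hPre with h | h
  · exact pvLoop_eq hs K (n := N) (by omega) 0 (N - 1) 0 le_rfl le_rfl (by omega)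
  · exact pvLoop_eq hs K (n := N) (by omega) 0 (N - 1) 0 le_rfl le_rfl (by omega)
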